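-- pv_equiv track=rewrite | github.com/miliar/Code_Jam_Webscraper | Solutions_python/Problem_155/3133.py | find_invites
-- ===== SOURCE A (Python) =====
-- def find_invites(shy):
--     crowd = 0
--     invites = 0
--
--     for i in range(max(shy) + 1):
--         if crowd < i:
--             invites += i - crowd
--             crowd += i - crowd
--         crowd += shy[i]
--
--     return invites
-- ===== SOURCE B (Python) =====
-- def find_invites(shy):
--     bound = max(shy) + 1
--     prefixes = [0]
--     for x in shy:
--         prefixes.append(prefixes[-1] + x)
--     return max((i - prefixes[i] for i in range(bound)), default=0)
-- ===== Notes on version B (the rewrite author's own statement) =====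
-- stated objective: alternative
-- what changed: Replaces A's single greedy simulation maintaining (crowd, invites) with two passes: first build the prefix-sum list of shy, then return the maximum shortfall max(i - prefix[i], default 0) over the same range.
import Mathlib
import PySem

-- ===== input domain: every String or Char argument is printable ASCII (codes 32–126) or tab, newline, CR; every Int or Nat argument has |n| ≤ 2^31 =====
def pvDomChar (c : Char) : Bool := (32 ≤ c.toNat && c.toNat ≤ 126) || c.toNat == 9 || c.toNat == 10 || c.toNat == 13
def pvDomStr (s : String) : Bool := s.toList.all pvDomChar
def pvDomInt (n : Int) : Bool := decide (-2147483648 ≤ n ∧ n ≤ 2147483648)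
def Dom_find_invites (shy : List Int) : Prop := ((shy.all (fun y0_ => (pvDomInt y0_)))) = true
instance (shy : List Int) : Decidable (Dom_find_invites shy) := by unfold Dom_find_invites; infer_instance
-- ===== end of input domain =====

-- B replaces A's greedy crowd/invites simulation by two passes: build the prefix-sum list of
-- shy, then return the largest shortfall max(i - prefix[i], default 0) — same cost, different decomposition.

-- ===== PORT A =====
-- the loop body of A: greedy state (crowd, invites)
def stepA (shy : List Int) (st : Int × Int) (i : Int) : Int × Int :=
  let st' := if st.1 < i then (st.1 + (i - st.1), st.2 + (i - st.1)) else st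
  (st'.1 + PySem.List.pyGetD shy i 0, st'.2)

def find_invites (shy : List Int) : Int :=
  match PySem.List.max? shy (fun y => y) with
  | none => 0  -- max(shy) raises ValueError on []; excluded by Pre_
  | some m =>
    ((PySem.List.pyRange 0 (m + 1) 1).foldl (stepA shy) ((0 : Int), (0 : Int))).2

-- ===== PORT B =====
def find_invites_alt (shy : List Int) : Int :=
  match PySem.List.max? shy (fun y => y) with
  | none => 0  -- max(shy) raises ValueError on []; excluded by Pre_
  | some m =>
    let bound := m + 1
    let prefixes := shy.foldl (fun acc x => acc ++ [PySem.List.pyGetD acc (-1) 0 + x]) [(0 : Int)]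
    ((PySem.List.max? ((PySem.List.pyRange 0 bound 1).map
        (fun i => i - PySem.List.pyGetD prefixes i 0)) (fun y => y)).getD 0)

-- ===== PRECONDITION & SPEC =====
-- Pre_ excludes exactly the inputs where A raises: the empty list (ValueError from max) and
-- lists whose maximum is ≥ len(shy) (IndexError from shy[i]).
def Pre_find_invites (shy : List Int) : Prop :=
  shy ≠ [] ∧ ∀ x ∈ shy, x < (shy.length : Int)
instance (shy : List Int) : Decidable (Pre_find_invites shy) := by
  unfold Pre_find_invites; infer_instance

def pvWitness_find_invites : List Int := [0, 1, 0]

def Spec_find_invites (shy : List Int) (out : Int) : Prop := out = find_invites_alt shy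
instance (shy : List Int) (out : Int) : Decidable (Spec_find_invites shy out) := by unfold Spec_find_invites; infer_instance

-- ===== CLAIM (what is proved, stated in full; the proofs are below) =====
def Claim_equal_find_invites : Prop := ∀ (shy : List Int), Dom_find_invites shy → Pre_find_invites shy → Spec_find_invites shy (find_invites shy)
-- ===== LEMMAS AND PROOFS =====

-- prefix sum of the first k elements
def psum (shy : List Int) (k : Nat) : Int := (shy.take k).sum

-- the tail of B's prefix list, as a structural recursion
def gpre : List Int → Int → List Int
  | [], _ => []
  | x :: xs, s => (s + x) :: gpre xs (s + x)

-- running shortfall maximum of A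
def dmax (shy : List Int) (n : Nat) : Int :=
  ((List.range n).map (fun k : Nat => ((k : Int) - psum shy k))).foldl max 0

lemma build_eq (l : List Int) : ∀ (acc : List Int) (h : acc ≠ []),
    l.foldl (fun acc x => acc ++ [PySem.List.pyGetD acc (-1) 0 + x]) acc
      = acc ++ gpre l (acc.getLast h) := by
  induction l with
  | nil => intro acc h; simp [gpre]
  | cons x xs ih =>
    intro acc h
    have hne : acc ++ [acc.getLast h + x] ≠ [] := by simp
    rw [List.foldl_cons, PySem.List.pyGetD_neg_one acc 0 h, ih _ hne]
    simp [gpre]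

lemma gpre_getD (l : List Int) : ∀ (s : Int) (k : Nat), k < l.length →
    (gpre l s).getD k 0 = s + (l.take (k + 1)).sum := by
  induction l with
  | nil => intro s k hk; simp at hk
  | cons x xs ih =>
    intro s k hk
    cases k with
    | zero => simp [gpre]
    | succ k =>
      have hk' : k < xs.length := by simpa using hk
      simp only [gpre, List.getD_cons_succ, List.take_succ_cons, List.sum_cons]
      rw [ih (s + x) k hk', add_assoc]

lemma prefixes_getD (shy : List Int) (k : Nat) (hk : k ≤ shy.length) :
    (shy.foldl (fun acc x => acc ++ [PySem.List.pyGetD acc (-1) 0 + x]) [(0 : Int)]).getD k 0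
      = psum shy k := by
  rw [build_eq shy [(0 : Int)] (by simp)]
  cases k with
  | zero => simp [psum]
  | succ k =>
    have hk' : k < shy.length := by omega
    simp only [List.getLast_singleton, List.singleton_append, List.getD_cons_succ]
    rw [gpre_getD shy 0 k hk', zero_add]
    rfl

lemma dmax_succ (shy : List Int) (n : Nat) :
    dmax shy (n + 1) = max (dmax shy n) ((n : Int) - psum shy n) := by
  simp [dmax, List.range_succ]

lemma psum_succ (shy : List Int) (n : Nat) (hn : n < shy.length) :
    psum shy (n + 1) = psum shy n + shy[n] := by
  simp [psum, List.sum_take_succ shy n hn]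

lemma loopA (shy : List Int) (n : Nat) (hn : n ≤ shy.length) :
    (PySem.List.pyRange 0 (n : Int) 1).foldl (stepA shy) ((0 : Int), (0 : Int))
      = (dmax shy n + psum shy n, dmax shy n) := by
  induction n with
  | zero =>
    rw [show ((0 : Nat) : Int) = 0 from rfl,
        PySem.List.pyRange_one_eq_nil (a := 0) (b := 0) le_rfl]
    simp [dmax, psum]
  | succ n ih =>
    have hn' : n ≤ shy.length := by omega
    have hlt : n < shy.length := by omega
    have hcast : ((n + 1 : Nat) : Int) = (n : Int) + 1 := by push_cast; ring
    rw [hcast, PySem.List.pyRange_one_succ_right (a := 0) (b := (n : Int)) (by omega),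
        List.foldl_append, ih hn']
    simp only [List.foldl_cons, List.foldl_nil]
    have hget : PySem.List.pyGetD shy (n : Int) 0 = shy[n] := by
      rw [PySem.List.pyGetD_natCast]
      exact List.getD_eq_getElem shy 0 hlt
    rw [dmax_succ, psum_succ shy n hlt]
    simp only [stepA, hget]
    split_ifs with hc <;> · rw [Prod.mk.injEq]; constructor <;> simp <;> omega

lemma listB (shy : List Int) (n : Nat) (hn : n ≤ shy.length) :
    (PySem.List.pyRange 0 (n : Int) 1).map
        (fun i => i - PySem.List.pyGetD
          (shy.foldl (fun acc x => acc ++ [PySem.List.pyGetD acc (-1) 0 + x]) [(0 : Int)]) i 0)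
      = (List.range n).map (fun k : Nat => ((k : Int) - psum shy k)) := by
  rw [PySem.List.pyRange_one, List.map_map]
  rw [show (((n : Int) - 0).toNat) = n by omega]
  apply List.map_congr_left
  intro k hk
  have hk' : k < n := List.mem_range.mp hk
  simp only [Function.comp_apply, zero_add]
  rw [PySem.List.pyGetD_natCast, prefixes_getD shy k (by omega)]

lemma maxB (shy : List Int) (n : Nat) (h1 : 1 ≤ n) :
    ((PySem.List.max? ((List.range n).map (fun k : Nat => ((k : Int) - psum shy k)))
        (fun y => y)).getD 0) = dmax shy n := by
  obtain ⟨j, rfl⟩ : ∃ j, n = j + 1 := ⟨n - 1, by omega⟩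
  rw [List.range_succ_eq_map]
  simp only [List.map_cons, List.map_map]
  have h0 : ((0 : Nat) : Int) - psum shy 0 = 0 := by simp [psum]
  rw [h0, PySem.List.max?_id_cons, Option.getD_some]
  unfold dmax
  rw [List.range_succ_eq_map]
  simp only [List.map_cons, List.map_map, List.foldl_cons, h0]
  rw [max_self]

lemma find_invites_eq (shy : List Int) (h : Pre_find_invites shy) :
    find_invites shy = find_invites_alt shy := by
  obtain ⟨hne, hlt⟩ := h
  obtain ⟨a, t, rfl⟩ : ∃ a t, shy = a :: t := by
    cases shy with
    | nil => exact absurd rfl hne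
    | cons a t => exact ⟨a, t, rfl⟩
  rw [find_invites, find_invites_alt, PySem.List.max?_id_cons]
  dsimp only
  set m := t.foldl max a with hm
  have hmem : m ∈ a :: t := by
    rcases PySem.List.foldl_max_mem t a with h | h
    · rw [hm, h]; exact List.mem_cons_self
    · exact List.mem_cons_of_mem a (hm ▸ h)
  have hmlt : m < ((a :: t).length : Int) := hlt m hmem
  by_cases hneg : m + 1 ≤ 0
  · rw [PySem.List.pyRange_one_eq_nil (a := 0) (b := m + 1) (by omega)]
    simp [PySem.List.max?]
  · have hcast : m + 1 = (((m + 1).toNat : Nat) : Int) := by omega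
    set n := (m + 1).toNat with hn
    have hn1 : 1 ≤ n := by omega
    have hnlen : n ≤ (a :: t).length := by
      simp only [List.length_cons] at hmlt ⊢
      omega
    rw [hcast, loopA (a :: t) n hnlen, listB (a :: t) n hnlen, maxB (a :: t) n hn1]

theorem find_invites_spec : Claim_equal_find_invites := by
  intro shy _ hpre
  unfold Spec_find_invites
  exact find_invites_eq shy hpre
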